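-- pv_equiv track=rewrite | github.com/LazyWatcher/AOIS_lab3 | main.py | find_redundant_terms
-- ===== SOURCE A (Python) =====
-- def find_redundant_terms(table):
--     rows = len(table)
--     cols = len(table[0])
--
--     result = []
--
--     for row in range(rows):
--         essential = False
--         for col in range(cols):
--             if table[row][col] == 1:
--                 count_ones_in_col = sum(table[r][col] for r in range(rows))
--                 if count_ones_in_col == 1:
--                     essential = True
--                     break
--
--         if essential:
--             result.append('1')
--         else:
--             result.append('0')
--             table[row] = [0] * cols
--
--     return ''.join(result)
-- ===== SOURCE B (Python) =====
-- def find_redundant_terms(table):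
--     # Does not mutate `table` (A zeroes redundant rows in place); return value is identical.
--     cols = len(table[0])
--     colsum = [sum(row[c] for row in table) for c in range(cols)]
--     out = []
--     for row in table:
--         if any(row[c] == 1 and colsum[c] == 1 for c in range(cols)):
--             out.append('1')
--         else:
--             out.append('0')
--             colsum = [colsum[c] - row[c] for c in range(cols)]
--     return ''.join(out)
-- ===== Notes on version B (the rewrite author's own statement) =====
-- stated objective: alternative
-- what changed: B precomputes the column sums once and decrements them incrementally when a redundant row is dropped, instead of A's on-demand rescan of a whole column (over the mutated table) for each 1-entry it meets; B also leaves the input table unmutated and builds the answer over the rows themselves rather than over indices.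
-- outside the precondition, e.g. on find_redundant_terms([[1, 0], [1]]): A returns '01', B raises IndexError
import Mathlib
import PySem

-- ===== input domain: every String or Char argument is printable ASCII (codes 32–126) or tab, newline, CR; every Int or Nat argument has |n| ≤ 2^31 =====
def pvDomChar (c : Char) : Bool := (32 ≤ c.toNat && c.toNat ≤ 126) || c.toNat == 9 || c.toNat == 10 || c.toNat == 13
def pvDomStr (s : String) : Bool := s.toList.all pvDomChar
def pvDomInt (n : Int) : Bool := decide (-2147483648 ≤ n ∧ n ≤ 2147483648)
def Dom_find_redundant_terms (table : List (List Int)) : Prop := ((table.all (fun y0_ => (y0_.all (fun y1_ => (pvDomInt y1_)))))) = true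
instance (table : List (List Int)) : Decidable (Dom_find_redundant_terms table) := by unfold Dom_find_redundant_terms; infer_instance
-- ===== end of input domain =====

-- B replaces A's per-1-entry rescan of a whole column by column sums computed once and
-- decremented when a row is zeroed; equivalence is about the RETURN value only:
-- A zeroes redundant rows of `table` in place, B does not mutate its argument.

-- ===== PORT A =====
-- sum(table[r][col] for r in range(rows))
def pvColCount (table : List (List Int)) (rows col : Int) : Int :=
  ((PySem.List.pyRange 0 rows 1).map
    (fun r => PySem.List.pyGetD (PySem.List.pyGetD table r []) col 0)).sum

-- inner 'for col in range(cols): … break' as recursion over the remaining cols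
def pvAEss (table : List (List Int)) (rows row : Int) : List Int → Bool
  | [] => false
  | c :: cs =>
    if PySem.List.pyGetD (PySem.List.pyGetD table row []) c 0 = 1 then
      if pvColCount table rows c = 1 then true else pvAEss table rows row cs
    else pvAEss table rows row cs

-- main 'for row in range(rows)' loop; state = (mutated table, result list)
def pvALoop (rows cols : Int) :
    List Int → List (List Int) → List String → (List (List Int) × List String)
  | [], table, res => (table, res)
  | i :: is, table, res =>
    if pvAEss table rows i (PySem.List.pyRange 0 cols 1) then
      pvALoop rows cols is table (res ++ ["1"])
    else
      pvALoop rows cols is (PySem.List.pySetD table i (List.replicate cols.toNat 0))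
        (res ++ ["0"])

def find_redundant_terms (table : List (List Int)) : String :=
  PySem.Str.join "" (pvALoop (table.length : Int) ((PySem.List.pyGetD table 0 []).length : Int)
    (PySem.List.pyRange 0 (table.length : Int) 1) table []).2

-- ===== PORT B =====
-- colsum = [sum(row[c] for row in table) for c in range(cols)]
def pvBColsum (table : List (List Int)) (cols : Int) : List Int :=
  (PySem.List.pyRange 0 cols 1).map
    (fun c => (table.map (fun row => PySem.List.pyGetD row c 0)).sum)

-- 'for row in table' with the running colsum
def pvBLoop (cols : Int) : List (List Int) → List Int → List String
  | [], _ => []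
  | row :: rest, cs =>
    if (PySem.List.pyRange 0 cols 1).any
        (fun c => (PySem.List.pyGetD row c 0 == 1) && (PySem.List.pyGetD cs c 0 == 1)) then
      "1" :: pvBLoop cols rest cs
    else
      "0" :: pvBLoop cols rest
        ((PySem.List.pyRange 0 cols 1).map
          (fun c => PySem.List.pyGetD cs c 0 - PySem.List.pyGetD row c 0))

def find_redundant_terms_alt (table : List (List Int)) : String :=
  PySem.Str.join "" (pvBLoop ((PySem.List.pyGetD table 0 []).length : Int) table
    (pvBColsum table ((PySem.List.pyGetD table 0 []).length : Int)))

-- ===== PRECONDITION & SPEC =====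
-- Pre_ excludes the empty table (A raises IndexError on table[0]) and ragged tables with a
-- row shorter than the first row: there B's precomputed column sums raise IndexError, and A
-- itself raises unless every such short row's column scan happens to break early.
def Pre_find_redundant_terms (table : List (List Int)) : Prop :=
  table ≠ [] ∧ ∀ row ∈ table, (table.headD []).length ≤ row.length
instance (table : List (List Int)) : Decidable (Pre_find_redundant_terms table) := by
  unfold Pre_find_redundant_terms; infer_instance

def pvWitness_find_redundant_terms : List (List Int) := [[1, 0], [0, 1], [1, 1]]

def Spec_find_redundant_terms (table : List (List Int)) (out : String) : Prop :=
  out = find_redundant_terms_alt table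
instance (table : List (List Int)) (out : String) : Decidable (Spec_find_redundant_terms table out) := by
  unfold Spec_find_redundant_terms; infer_instance

-- ===== CLAIM (what is proved, stated in full; the proofs are below) =====
def Claim_equal_find_redundant_terms : Prop :=
  ∀ (table : List (List Int)), Dom_find_redundant_terms table →
    Pre_find_redundant_terms table →
    Spec_find_redundant_terms table (find_redundant_terms table)

-- ===== LEMMAS AND PROOFS =====

-- column sum of a table at column c (the quantity both programs track)
def pvColSumAt (c : Int) (t : List (List Int)) : Int :=
  (t.map (fun r => PySem.List.pyGetD r c 0)).sum

theorem pvColSumAt_append (c : Int) (xs ys : List (List Int)) :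
    pvColSumAt c (xs ++ ys) = pvColSumAt c xs + pvColSumAt c ys := by
  simp [pvColSumAt]

theorem pvColSumAt_cons (c : Int) (y : List Int) (ys : List (List Int)) :
    pvColSumAt c (y :: ys) = PySem.List.pyGetD y c 0 + pvColSumAt c ys := by
  simp [pvColSumAt]

theorem pvGetD_replicate (c : Int) (n : Nat) :
    PySem.List.pyGetD (List.replicate n (0 : Int)) c 0 = 0 := by
  unfold PySem.List.pyGetD
  cases h : PySem.List.pyGet? (List.replicate n (0 : Int)) c with
  | none => rfl
  | some x =>
    simp [List.eq_of_mem_replicate (PySem.List.mem_of_pyGet?_eq_some _ h)]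

theorem pvColCount_eq (table : List (List Int)) (c : Int) :
    pvColCount table (table.length : Int) c = pvColSumAt c table := by
  unfold pvColCount pvColSumAt
  rw [PySem.List.pyRange_one]
  simp only [List.map_map]
  congr 1
  rw [show ((table.length : Int) - 0).toNat = table.length by omega]
  apply List.ext_getElem
  · simp
  · intro i h1 h2
    have h1' : i < table.length := by simpa using h2
    simp [PySem.List.pyGetD_natCast, List.getD_eq_getElem?_getD,
      List.getElem?_eq_getElem h1']

theorem pvAEss_eq_any (table : List (List Int)) (rows i : Int) (cl : List Int) :
    pvAEss table rows i cl
      = cl.any (fun c =>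
          (PySem.List.pyGetD (PySem.List.pyGetD table i []) c 0 == 1)
            && (pvColCount table rows c == 1)) := by
  induction cl with
  | nil => simp [pvAEss]
  | cons c cs ih =>
    simp only [pvAEss, List.any_cons, ih]
    by_cases h1 : PySem.List.pyGetD (PySem.List.pyGetD table i []) c 0 = 1
    · by_cases h2 : pvColCount table rows c = 1 <;> simp [h1, h2]
    · simp [h1]

theorem pvGetD_mid (done : List (List Int)) (row : List Int) (rest : List (List Int)) :
    PySem.List.pyGetD (done ++ row :: rest) (done.length : Int) [] = row := by
  rw [PySem.List.pyGetD_natCast]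
  simp [List.getD_eq_getElem?_getD]

theorem pvSet_mid (done : List (List Int)) (row z : List Int) (rest : List (List Int)) :
    (done ++ row :: rest).set done.length z = done ++ z :: rest := by
  induction done with
  | nil => simp
  | cons d ds ih => simp [ih]

theorem pvGetD_colsum (t : List (List Int)) (n : Nat) (c : Int)
    (h0 : 0 ≤ c) (hn : c < (n : Int)) :
    PySem.List.pyGetD ((PySem.List.pyRange 0 (n : Int) 1).map (fun c => pvColSumAt c t)) c 0
      = pvColSumAt c t := by
  exact PySem.List.pyGetD_map_pyRange_of_nonneg _ _ _ _ h0 hn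

-- the main invariant: A's loop over the remaining row indices, on the partially zeroed
-- table, produces exactly B's loop over the remaining rows with the running column sums
theorem pvMain (n : Nat) (rest : List (List Int)) :
    ∀ (done : List (List Int)) (res : List String) (a b : Int),
      a = (done.length : Int) → b = a + (rest.length : Int) →
      (pvALoop b (n : Int) (PySem.List.pyRange a b 1) (done ++ rest) res).2
        = res ++ pvBLoop (n : Int) rest
            ((PySem.List.pyRange 0 (n : Int) 1).map (fun c => pvColSumAt c (done ++ rest))) := by
  induction rest with
  | nil =>
    intro done res a b ha hb
    have hab : b = a := by simp at hb; omega
    subst hab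
    rw [PySem.List.pyRange_zero]
    simp [pvALoop, pvBLoop]
  | cons row rest ih =>
    intro done res a b ha hb
    have hlt : a < b := by simp at hb; omega
    rw [PySem.List.pyRange_one_cons hlt]
    simp only [pvALoop]
    have hrows : b = (((done ++ row :: rest).length : Nat) : Int) := by
      simp [ha] at hb ⊢; omega
    -- the essentiality test of A equals B's test on the running column sums
    have hess : pvAEss (done ++ row :: rest) b a (PySem.List.pyRange 0 (n : Int) 1)
        = (PySem.List.pyRange 0 (n : Int) 1).any
            (fun c => (PySem.List.pyGetD row c 0 == 1)
              && (PySem.List.pyGetD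
                    ((PySem.List.pyRange 0 (n : Int) 1).map
                      (fun c => pvColSumAt c (done ++ row :: rest))) c 0 == 1)) := by
      rw [pvAEss_eq_any, ha, pvGetD_mid, hrows]
      apply PySem.List.any_congr_mem
      intro c hc
      have hbnd := PySem.List.mem_pyRange_one.mp hc
      rw [pvColCount_eq, pvGetD_colsum _ _ _ (by omega) (by omega)]
    rw [hess]
    simp only [pvBLoop]
    by_cases hcase : (PySem.List.pyRange 0 (n : Int) 1).any
        (fun c => (PySem.List.pyGetD row c 0 == 1)
          && (PySem.List.pyGetD
                ((PySem.List.pyRange 0 (n : Int) 1).map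
                  (fun c => pvColSumAt c (done ++ row :: rest))) c 0 == 1)) = true
    · rw [hcase, if_pos rfl, if_pos rfl]
      have := ih (done ++ [row]) (res ++ ["1"]) (a + 1) b
        (by simp [ha]) (by simp at hb ⊢; omega)
      simp only [List.append_assoc, List.cons_append, List.nil_append] at this
      rw [this]
    · rw [Bool.not_eq_true] at hcase
      rw [hcase]
      simp only [Bool.false_eq_true, if_false]
      have hset : PySem.List.pySetD (done ++ row :: rest) a
            (List.replicate ((n : Int)).toNat 0)
          = done ++ (List.replicate n (0 : Int)) :: rest := by
        rw [ha, PySem.List.pySetD_natCast, pvSet_mid]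
        simp
      rw [hset]
      have := ih (done ++ [List.replicate n (0 : Int)]) (res ++ ["0"]) (a + 1) b
        (by simp [ha]) (by simp at hb ⊢; omega)
      simp only [List.append_assoc, List.cons_append, List.nil_append] at this
      rw [this]
      -- the decremented column sums are the column sums of the zeroed table
      have hcs : ((PySem.List.pyRange 0 (n : Int) 1).map
            (fun c => pvColSumAt c (done ++ List.replicate n (0 : Int) :: rest)))
          = ((PySem.List.pyRange 0 (n : Int) 1).map
              (fun c =>
                PySem.List.pyGetD
                  ((PySem.List.pyRange 0 (n : Int) 1).map
                    (fun c => pvColSumAt c (done ++ row :: rest))) c 0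
                - PySem.List.pyGetD row c 0)) := by
        apply List.map_congr_left
        intro c hc
        have hbnd := PySem.List.mem_pyRange_one.mp hc
        rw [pvGetD_colsum _ _ _ (by omega) (by omega)]
        rw [pvColSumAt_append, pvColSumAt_append, pvColSumAt_cons, pvColSumAt_cons,
          pvGetD_replicate]
        ring
      rw [hcs]

-- ===== VERDICT (by name: the statement is the Claim_ definition above) =====
theorem find_redundant_terms_spec : Claim_equal_find_redundant_terms := by
  intro table _ _
  unfold Spec_find_redundant_terms find_redundant_terms find_redundant_terms_alt
  have h := pvMain (PySem.List.pyGetD table 0 []).length table [] [] 0 (table.length : Int)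
    (by simp) (by simp)
  simp only [List.nil_append] at h
  rw [h]
  rfl
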